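-- pv_equiv track=rewrite | github.com/b-zhu524/usaco_practice | lifeguards/lifeguards3.py | solve
-- ===== SOURCE A (Python) =====
-- def solve(time_list, shifts, total_time):
--     max_time = 0
--     for start_fire, end_fire in shifts:
--         new_time = total_time
--         for i in range(start_fire, end_fire):
--             if time_list[i] - 1 == 0:
--                 new_time -= 1
--
--         if new_time > max_time:
--             max_time = new_time
--     return max_time
-- ===== SOURCE B (Python) =====
-- def solve(time_list, shifts, total_time):
--     # Prefix sums of 1-entries: each shift answered by one subtraction.
--     pref = [0]
--     c = 0
--     for t in time_list:
--         c += 1 if t == 1 else 0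
--         pref.append(c)
--     best = 0
--     for s, e in shifts:
--         cover = total_time if e <= s else total_time - (pref[e] - pref[s])
--         if cover > best:
--             best = cover
--     return best
-- ===== Notes on version B (the rewrite author's own statement) =====
-- stated objective: alternative
-- what changed: B precomputes a prefix-sum array of the 1-entries once and answers each shift with an O(1) subtraction, instead of A's inner rescan of the interval per shift.
-- outside the precondition, e.g. on solve([1, 1], [(-1, 1)], 5): A returns 3, B returns 6
import Mathlib
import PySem

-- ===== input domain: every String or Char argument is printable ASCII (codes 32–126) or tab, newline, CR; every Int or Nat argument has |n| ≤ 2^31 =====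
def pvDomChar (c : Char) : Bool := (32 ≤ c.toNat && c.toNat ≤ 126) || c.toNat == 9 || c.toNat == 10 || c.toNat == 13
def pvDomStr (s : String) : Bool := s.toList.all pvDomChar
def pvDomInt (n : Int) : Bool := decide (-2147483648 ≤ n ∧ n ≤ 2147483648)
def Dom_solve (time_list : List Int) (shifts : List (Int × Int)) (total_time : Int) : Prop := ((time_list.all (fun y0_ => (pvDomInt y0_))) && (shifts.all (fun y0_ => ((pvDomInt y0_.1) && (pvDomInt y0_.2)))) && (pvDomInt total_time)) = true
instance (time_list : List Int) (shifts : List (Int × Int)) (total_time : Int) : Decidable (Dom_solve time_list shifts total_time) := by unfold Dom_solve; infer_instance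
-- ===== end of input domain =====

-- B replaces A's per-shift rescan of the interval by a prefix-sum array of 1-entries, answering each shift with one subtraction (objective: alternative).

-- ===== PORT A =====
def solve (time_list : List Int) (shifts : List (Int × Int)) (total_time : Int) : Int :=
  shifts.foldl (fun max_time p =>
    let new_time := (PySem.List.pyRange p.1 p.2 1).foldl
      (fun nt i => if PySem.List.pyGetD time_list i 0 - 1 = 0 then nt - 1 else nt) total_time
    if new_time > max_time then new_time else max_time) 0

-- ===== PORT B =====
def solve_alt (time_list : List Int) (shifts : List (Int × Int)) (total_time : Int) : Int :=
  let pref := (time_list.foldl (fun (a : List Int × Int) t =>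
      let c := a.2 + (if t = 1 then (1 : Int) else 0)
      (a.1 ++ [c], c)) ([0], 0)).1
  shifts.foldl (fun best p =>
    let cover := if p.2 ≤ p.1 then total_time
      else total_time - (PySem.List.pyGetD pref p.2 0 - PySem.List.pyGetD pref p.1 0)
    if cover > best then cover else best) 0

-- ===== PRECONDITION & SPEC =====
-- Pre_ keeps each shift inside the natural domain (empty, or 0 ≤ start and end ≤ len(time_list)):
-- outside it A either raises IndexError or silently wraps negative indices to the end of the list,
-- a corner outside the problem's natural domain that B's prefix sums do not reproduce.
def Pre_solve (time_list : List Int) (shifts : List (Int × Int)) (total_time : Int) : Prop :=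
  ∀ p ∈ shifts, p.2 ≤ p.1 ∨ (0 ≤ p.1 ∧ p.2 ≤ (time_list.length : Int))
instance (time_list : List Int) (shifts : List (Int × Int)) (total_time : Int) : Decidable (Pre_solve time_list shifts total_time) := by unfold Pre_solve; infer_instance
def pvWitness_solve : List Int × (List (Int × Int)) × Int := ([1, 0, 1], [(0, 2), (1, 3)], 3)

def Spec_solve (time_list : List Int) (shifts : List (Int × Int)) (total_time : Int) (out : Int) : Prop := out = solve_alt time_list shifts total_time
instance (time_list : List Int) (shifts : List (Int × Int)) (total_time : Int) (out : Int) : Decidable (Spec_solve time_list shifts total_time out) := by unfold Spec_solve; infer_instance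

-- ===== CLAIM (what is proved, stated in full; the proofs are below) =====
def Claim_equal_solve : Prop := ∀ (time_list : List Int) (shifts : List (Int × Int)) (total_time : Int), Dom_solve time_list shifts total_time → Pre_solve time_list shifts total_time → Spec_solve time_list shifts total_time (solve time_list shifts total_time)

-- ===== LEMMAS AND PROOFS =====

/-- Number of 1-entries, as the sum of a 0/1 map. -/
def cnt (l : List Int) : Int := (l.map (fun t => if t = 1 then (1 : Int) else 0)).sum

theorem cnt_nil : cnt [] = 0 := rfl

theorem cnt_cons (t : Int) (l : List Int) :
    cnt (t :: l) = (if t = 1 then (1 : Int) else 0) + cnt l := by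
  simp [cnt]

theorem cnt_append (l₁ l₂ : List Int) : cnt (l₁ ++ l₂) = cnt l₁ + cnt l₂ := by
  simp [cnt]

/-- Characterisation of B's prefix-array fold. -/
theorem pref_fold (l : List Int) (acc : List Int) (c : Int) :
    (l.foldl (fun (a : List Int × Int) t =>
        (a.1 ++ [a.2 + (if t = 1 then (1 : Int) else 0)], a.2 + (if t = 1 then (1 : Int) else 0)))
        (acc, c)).1
      = acc ++ (List.range l.length).map (fun k => c + cnt (l.take (k + 1))) := by
  induction l generalizing acc c with
  | nil => simp
  | cons t l ih =>
    simp only [List.foldl_cons, ih, List.length_cons, List.range_succ_eq_map]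
    simp [List.append_assoc, cnt_cons, cnt_nil, List.take_succ_cons, Function.comp, add_assoc]

theorem pref_get (l : List Int) (k : Nat) (hk : k ≤ l.length) :
    PySem.List.pyGetD
      ((l.foldl (fun (a : List Int × Int) t =>
          (a.1 ++ [a.2 + (if t = 1 then (1 : Int) else 0)], a.2 + (if t = 1 then (1 : Int) else 0)))
          (([0], 0) : List Int × Int)).1) (k : Int) 0
      = cnt (l.take k) := by
  rw [pref_fold]
  rw [PySem.List.pyGetD_natCast]
  cases k with
  | zero => simp [cnt]
  | succ j =>
    have hj : j < l.length := by omega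
    rw [List.getD_eq_getElem?_getD]
    simp [hj]

/-- A's inner loop over `range(s, e)` counts via the prefix sums. -/
theorem inner_loop (l : List Int) (s e : Nat) (nt : Int) (hse : s ≤ e) (he : e ≤ l.length) :
    (PySem.List.pyRange (s : Int) (e : Int) 1).foldl
      (fun nt i => if PySem.List.pyGetD l i 0 - 1 = 0 then nt - 1 else nt) nt
      = nt - (cnt (l.take e) - cnt (l.take s)) := by
  induction e, hse using Nat.le_induction generalizing nt with
  | base => simp [PySem.List.pyRange_one_eq_nil]
  | succ e hse ih =>
    have h1 : (s : Int) ≤ (e : Int) := by exact_mod_cast hse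
    rw [show ((e + 1 : Nat) : Int) = (e : Int) + 1 by push_cast; ring,
        PySem.List.pyRange_one_succ_right h1, List.foldl_append]
    rw [ih nt (by omega)]
    have helem : l.take (e + 1) = l.take e ++ [l[e]'(by omega)] := by
      rw [List.take_succ]
      simp [List.getElem?_eq_getElem (by omega : e < l.length)]
    have hget : PySem.List.pyGetD l (e : Int) 0 = l[e]'(by omega) := by
      rw [PySem.List.pyGetD_natCast]
      simp [List.getD_eq_getElem?_getD, List.getElem?_eq_getElem (by omega : e < l.length)]
    simp only [List.foldl_cons, List.foldl_nil, hget, helem, cnt_append, cnt_cons, cnt_nil]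
    by_cases h : l[e]'(by omega) = 1
    · simp [h, sub_eq_iff_eq_add]; ring
    · have : l[e]'(by omega) - 1 ≠ 0 := by
        intro hc; exact h (by omega)
      simp [h, this]

theorem foldl_cong {α β : Type} (f g : β → α → β) (l : List α) (i : β)
    (h : ∀ b a, a ∈ l → f b a = g b a) : l.foldl f i = l.foldl g i := by
  induction l generalizing i with
  | nil => rfl
  | cons x xs ih =>
    simp only [List.foldl_cons]
    rw [h i x (by simp)]
    exact ih _ (fun b a ha => h b a (by simp [ha]))

-- ===== VERDICT (by name: the statement is the Claim_ definition above) =====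
theorem solve_spec : Claim_equal_solve := by
  intro time_list shifts total_time _hDom hPre
  show solve time_list shifts total_time = solve_alt time_list shifts total_time
  unfold solve solve_alt
  apply foldl_cong
  intro b p hp
  rcases hPre p hp with h | ⟨hs, he⟩
  · rw [if_pos h, PySem.List.pyRange_one_eq_nil h]; simp
  · by_cases hse : p.2 ≤ p.1
    · rw [if_pos hse, PySem.List.pyRange_one_eq_nil hse]; simp
    · rw [if_neg hse]
      have hs2 : 0 ≤ p.2 := by omega
      have h1 : p.1 = ((p.1.toNat : Nat) : Int) := by omega
      have h2 : p.2 = ((p.2.toNat : Nat) : Int) := by omega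
      rw [h1, h2, inner_loop time_list p.1.toNat p.2.toNat total_time (by omega) (by omega),
          pref_get time_list p.2.toNat (by omega), pref_get time_list p.1.toNat (by omega)]
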